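-- pv_equiv track=rewrite | github.com/CP-STA/contest-problems | count-larger-and-smaller/generator_memo.py | solve
-- ===== SOURCE A (Python) =====
-- def solve(n, a, m, li):
--     a.sort()
--
--     largest = {}
--     smallest = {}
--     for el in a:
--         largest[el] = -1
--         smallest[el] = n
--     for i in range(n):
--         largest[a[i]] = i
--     for i in range(n - 1, -1, -1):
--         smallest[a[i]] = i
--
--     OUT = ''
--     for el in li:
--         x, op = el
--         if op == 'LARGER':
--             flag = True
--             left = -1
--             right = n
--             while left + 1 < right:
--                 mid = (left + right) // 2
--                 if a[mid] < x:
--                     left = mid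
--                 elif x < a[mid]:
--                     right = mid
--                 else:
--                     OUT += str((n - 1) - (largest[a[mid]] + 1) + 1) + '\n'
--                     flag = False
--                     break
--             if flag:
--                 if x < a[0]:
--                     OUT += str(n) + '\n'
--                 elif a[n - 1] <= x:
--                     OUT += str(0) + '\n'
--                 else:
--                     OUT += str(n - right) + '\n'
--         else:
--             flag = True
--             left = -1
--             right = n
--             while left + 1 < right:
--                 mid = (left + right) // 2
--                 if a[mid] < x:
--                     left = mid
--                 elif x < a[mid]:
--                     right = mid
--                 else:
--                     OUT += str(smallest[a[mid]]) + '\n'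
--                     flag = False
--                     break
--             if flag:
--                 if a[n - 1] < x:
--                     OUT += str(n) + '\n'
--                 elif x <= a[0]:
--                     OUT += str(0) + '\n'
--                 else:
--                     OUT += str(right) + '\n'
--     return OUT
-- ===== SOURCE B (Python) =====
-- def solve(n, a, m, li):
--     # a.sort() kept: A sorts its argument in place and a caller can observe that.
--     a.sort()
--     pre = a[:n]
--     return ''.join(
--         str(sum(1 for v in pre if (v > x if op == 'LARGER' else v < x))) + '\n'
--         for x, op in li)
-- ===== Notes on version B (the rewrite author's own statement) =====
-- stated objective: simpler
-- what changed: B drops A's two dict tables and the per-query binary search with its boundary special-cases, and answers each query with one direct linear count (strictly larger / strictly smaller) over the first n sorted elements, joined into the output string.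
-- outside the precondition, e.g. on solve(-1, [5, 6], 1, [(1, 'LARGER')]): A returns '-1\n', B returns '1\n'
import Mathlib
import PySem

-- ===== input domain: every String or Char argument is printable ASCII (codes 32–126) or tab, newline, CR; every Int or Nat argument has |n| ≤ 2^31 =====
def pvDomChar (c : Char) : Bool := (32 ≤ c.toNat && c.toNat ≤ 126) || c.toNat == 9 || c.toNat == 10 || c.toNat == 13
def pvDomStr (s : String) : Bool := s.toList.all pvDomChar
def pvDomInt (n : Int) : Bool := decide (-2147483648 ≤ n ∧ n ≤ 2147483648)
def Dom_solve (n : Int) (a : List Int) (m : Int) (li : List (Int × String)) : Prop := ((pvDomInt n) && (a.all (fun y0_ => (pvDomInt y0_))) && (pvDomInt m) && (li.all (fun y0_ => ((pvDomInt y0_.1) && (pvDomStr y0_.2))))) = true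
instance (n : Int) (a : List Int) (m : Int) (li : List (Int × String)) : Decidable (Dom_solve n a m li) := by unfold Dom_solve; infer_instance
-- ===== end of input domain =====

-- B replaces A's dict tables and per-query binary search by one direct linear count per query
-- (simpler; not faster). Equivalence is about the RETURN value; Python A sorts its argument in
-- place and Python B performs the same a.sort().

-- ===== PORT A =====
-- the table-building loop body 'largest[a[i]] = i' / 'smallest[a[i]] = i' (a[i] : IndexError = none, outside Pre_solve)
def tblStep (s : List Int) : PySem.Dict Int Int → Int → PySem.Dict Int Int :=
  fun d i => match PySem.List.pyGet? s i with
             | some v => d.insert v i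
             | none => d

-- A's while-loop for a 'LARGER' query; fuel only makes the recursion structural (never exhausted:
-- the interval shrinks), "" stands on branches where Python raises (outside Pre_solve)
def solveLoopL (s : List Int) (n : Int) (largest : PySem.Dict Int Int) (x : Int)
    (left right : Int) : Nat → String
  | 0 => ""
  | fuel+1 =>
    if left + 1 < right then
      let mid := PySem.Int.floordiv (left + right) 2
      match PySem.List.pyGet? s mid with
      | none => ""  -- IndexError, outside Pre_solve
      | some am =>
        if am < x then solveLoopL s n largest x mid right fuel
        else if x < am then solveLoopL s n largest x left mid fuel
        else
          match largest.get? am with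
          | some gi => PySem.Int.toStr ((n - 1) - (gi + 1) + 1) ++ "\n"
          | none => ""  -- KeyError, unreachable: every element of s is a key
    else
      match PySem.List.pyGet? s 0 with
      | none => ""  -- IndexError, outside Pre_solve
      | some a0 =>
        if x < a0 then PySem.Int.toStr n ++ "\n"
        else
          match PySem.List.pyGet? s (n - 1) with
          | none => ""  -- IndexError, outside Pre_solve
          | some alast =>
            if alast ≤ x then PySem.Int.toStr 0 ++ "\n"
            else PySem.Int.toStr (n - right) ++ "\n"

-- A's while-loop for a non-'LARGER' query
def solveLoopS (s : List Int) (n : Int) (smallest : PySem.Dict Int Int) (x : Int)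
    (left right : Int) : Nat → String
  | 0 => ""
  | fuel+1 =>
    if left + 1 < right then
      let mid := PySem.Int.floordiv (left + right) 2
      match PySem.List.pyGet? s mid with
      | none => ""  -- IndexError, outside Pre_solve
      | some am =>
        if am < x then solveLoopS s n smallest x mid right fuel
        else if x < am then solveLoopS s n smallest x left mid fuel
        else
          match smallest.get? am with
          | some gi => PySem.Int.toStr gi ++ "\n"
          | none => ""  -- KeyError, unreachable
    else
      match PySem.List.pyGet? s (n - 1) with
      | none => ""  -- IndexError, outside Pre_solve
      | some alast =>
        if alast < x then PySem.Int.toStr n ++ "\n"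
        else
          match PySem.List.pyGet? s 0 with
          | none => ""  -- IndexError, outside Pre_solve
          | some a0 =>
            if x ≤ a0 then PySem.Int.toStr 0 ++ "\n"
            else PySem.Int.toStr right ++ "\n"

def solve (n : Int) (a : List Int) (m : Int) (li : List (Int × String)) : String :=
  let s := PySem.List.sorted a (fun v => v)   -- a.sort()
  let largest0 := s.foldl (fun d el => d.insert el (-1)) PySem.Dict.empty
  let smallest0 := s.foldl (fun d el => d.insert el n) PySem.Dict.empty
  let largest := (PySem.List.pyRange 0 n 1).foldl (tblStep s) largest0
  let smallest := (PySem.List.pyRange (n - 1) (-1) (-1)).foldl (tblStep s) smallest0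
  li.foldl (fun OUT el =>
      OUT ++ (if el.2 == "LARGER" then solveLoopL s n largest el.1 (-1) n ((n + 1).toNat + 1)
              else solveLoopS s n smallest el.1 (-1) n ((n + 1).toNat + 1))) ""

-- ===== PORT B =====
def solve_alt (n : Int) (a : List Int) (m : Int) (li : List (Int × String)) : String :=
  let s := PySem.List.sorted a (fun v => v)   -- a.sort()
  let pre := PySem.List.slice s none (some n)  -- a[:n]
  PySem.Str.join "" (li.map (fun el =>
    PySem.Int.toStr (pre.foldl (fun acc v =>
      if (if el.2 == "LARGER" then el.1 < v else v < el.1) then acc + 1 else acc) (0 : Int))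
    ++ "\n"))

-- ===== PRECONDITION & SPEC =====
-- Pre_solve keeps n ≤ len(a) (n is the declared length of a; for n > len(a) A raises IndexError
-- building its tables) and, when the query list is nonempty, requires n ≥ 1 (or n = 0 with a
-- nonempty a): for n < 0 A either raises IndexError or falls into Python negative-index
-- wraparound and returns accidental outputs such as '-1'; for n = 0 with empty a it raises
-- IndexError reading a[0].
def Pre_solve (n : Int) (a : List Int) (m : Int) (li : List (Int × String)) : Prop :=
  n ≤ (a.length : Int) ∧ (li ≠ [] → 1 ≤ n ∨ (n = 0 ∧ a ≠ []))
instance (n : Int) (a : List Int) (m : Int) (li : List (Int × String)) : Decidable (Pre_solve n a m li) := by unfold Pre_solve; infer_instance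
def pvWitness_solve : Int × List Int × Int × (List (Int × String)) :=
  (2, [2, 1, 2], 2, [(2, "LARGER"), (0, "SMALLER")])

def Spec_solve (n : Int) (a : List Int) (m : Int) (li : List (Int × String)) (out : String) : Prop := out = solve_alt n a m li
instance (n : Int) (a : List Int) (m : Int) (li : List (Int × String)) (out : String) : Decidable (Spec_solve n a m li out) := by unfold Spec_solve; infer_instance

-- ===== CLAIM (what is proved, stated in full; the proofs are below) =====
def Claim_equal_solve : Prop := ∀ (n : Int) (a : List Int) (m : Int) (li : List (Int × String)), Dom_solve n a m li → Pre_solve n a m li → Spec_solve n a m li (solve n a m li)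

-- ===== LEMMAS AND PROOFS =====

-- number of elements strictly below / strictly above x
def cntLT (s : List Int) (x : Int) : Nat := s.countP (fun v => decide (v < x))
def cntGT (s : List Int) (x : Int) : Nat := s.countP (fun v => decide (x < v))

theorem join_empty_cons (p : String) (ps : List String) :
    PySem.Str.join "" (p :: ps) = p ++ PySem.Str.join "" ps := by
  cases ps with
  | nil => simp [PySem.Str.join, PySem.Chars.join_singleton, PySem.Chars.join_nil]
  | cons q rest =>
    simp only [PySem.Str.join]
    rw [show ("" : String).toList = [] from rfl]
    rw [List.map_cons, List.map_cons, PySem.Chars.join_cons_cons]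
    simp [String.ofList_append]

theorem cnt_lt_char (x : Int) (s : List Int) (hp : s.Pairwise (· ≤ ·)) :
    ∀ (i : Nat), (h : i < s.length) → (s[i] < x ↔ i < cntLT s x) := by
  induction s with
  | nil => intro i h; simp at h
  | cons y t ih =>
    rw [List.pairwise_cons] at hp
    obtain ⟨hy, ht⟩ := hp
    intro i h
    by_cases hyx : y < x
    · rcases i with _ | j
      · simpa [cntLT, List.countP_cons, hyx] using Nat.succ_pos _
      · have := ih ht j (by simpa using h)
        simp only [List.getElem_cons_succ, cntLT, List.countP_cons, hyx] at *
        simp only [decide_true, if_true]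
        omega
    · have h0 : t.countP (fun v => decide (v < x)) = 0 := by
        rw [List.countP_eq_zero]
        intro z hz
        have := hy z hz
        simp; omega
      rcases i with _ | j
      · simp [cntLT, List.countP_cons, hyx, h0]
      · have hj : j < t.length := by simpa using h
        have : ¬ t[j] < x := by
          have := hy t[j] (List.getElem_mem hj)
          omega
        simp [cntLT, List.countP_cons, hyx, h0, this]

theorem cnt_gt_char (x : Int) (s : List Int) (hp : s.Pairwise (· ≤ ·)) :
    ∀ (i : Nat), (h : i < s.length) → (x < s[i] ↔ s.length - cntGT s x ≤ i) := by
  induction s with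
  | nil => intro i h; simp at h
  | cons y t ih =>
    rw [List.pairwise_cons] at hp
    obtain ⟨hy, ht⟩ := hp
    intro i h
    by_cases hxy : x < y
    · have hall : t.countP (fun v => decide (x < v)) = t.length := by
        rw [List.countP_eq_length]
        intro z hz
        have := hy z hz
        simp; omega
      have hlen : (y :: t).length - cntGT (y :: t) x = 0 := by
        simp [cntGT, List.countP_cons, hxy, hall]
      rw [hlen]
      rcases i with _ | j
      · simpa using hxy
      · have hj : j < t.length := by simpa using h
        have := hy t[j] (List.getElem_mem hj)
        simp only [List.getElem_cons_succ]
        constructor <;> intro _ <;> omega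
    · rcases i with _ | j
      · have hc : cntGT (y :: t) x = t.countP (fun v => decide (x < v)) := by
          simp [cntGT, List.countP_cons, hxy]
        have : t.countP (fun v => decide (x < v)) ≤ t.length := List.countP_le_length
        simp only [List.getElem_cons_zero, hc, List.length_cons]
        constructor <;> intro h' <;> omega
      · have hj : j < t.length := by simpa using h
        have := ih ht j hj
        have hc : cntGT (y :: t) x = cntGT t x := by
          simp [cntGT, List.countP_cons, hxy]
        have : cntGT t x ≤ t.length := List.countP_le_length
        simp only [List.getElem_cons_succ, hc, List.length_cons] at *
        constructor <;> intro h' <;> omega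

theorem cnt_sum_le (x : Int) (s : List Int) : cntLT s x + cntGT s x ≤ s.length := by
  have h1 := List.length_eq_countP_add_countP (l := s) (fun v => decide (v < x))
  have h2 : s.countP (fun v => decide (x < v)) ≤ s.countP (fun v => decide ¬ (decide (v < x)) = true) := by
    apply List.countP_mono_left
    intro z hz h
    simp at h ⊢
    omega
  unfold cntLT cntGT
  omega

theorem cnt_eq_char (x : Int) (s : List Int) (hp : s.Pairwise (· ≤ ·))
    (i : Nat) (h : i < s.length) :
    s[i] = x ↔ cntLT s x ≤ i ∧ i < s.length - cntGT s x := by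
  have h1 := cnt_lt_char x s hp i h
  have h2 := cnt_gt_char x s hp i h
  constructor
  · intro he
    rw [he] at h1 h2
    constructor
    · omega
    · by_contra hc
      have := h2.mpr (by omega)
      omega
  · intro ⟨ha, hb⟩
    have e1 : ¬ s[i] < x := fun hc => by have := h1.mp hc; omega
    have e2 : ¬ x < s[i] := fun hc => by have := h2.mp hc; omega
    omega

theorem mem_cnt_lt (x : Int) (s : List Int) (hp : s.Pairwise (· ≤ ·)) (hx : x ∈ s) :
    cntLT s x + cntGT s x < s.length := by
  obtain ⟨i, hi, he⟩ := List.mem_iff_getElem.mp hx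
  have := (cnt_eq_char x s hp i hi).mp he
  have := cnt_sum_le x s
  have : cntGT s x ≤ s.length := List.countP_le_length
  omega

theorem tblStep_get (s : List Int) (d : PySem.Dict Int Int) (k : Nat) (hk : k < s.length) :
    tblStep s d (k : Int) = d.insert s[k] (k : Int) := by
  simp [tblStep, PySem.List.pyGet?_natCast, List.getElem?_eq_getElem hk]

theorem largest_get? (x : Int) (s : List Int) (hp : s.Pairwise (· ≤ ·)) (hx : x ∈ s) :
    ∀ (k : Nat), k ≤ s.length → ∀ (d : PySem.Dict Int Int),
      ((PySem.List.pyRange 0 (k : Int) 1).foldl (tblStep s) d).get? x =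
        if k ≤ cntLT s x then d.get? x
        else some (((min k (s.length - cntGT s x) : Nat) : Int) - 1) := by
  have hmem := mem_cnt_lt x s hp hx
  intro k
  induction k with
  | zero =>
    intro _ d
    rw [show ((0 : Nat) : Int) = 0 by norm_num, PySem.List.pyRange_one_eq_nil (le_refl 0)]
    simp
  | succ k ih =>
    intro hk d
    have hk' : k < s.length := by omega
    rw [show ((k + 1 : Nat) : Int) = (k : Int) + 1 by push_cast; ring,
        PySem.List.pyRange_one_succ_right (by positivity), List.foldl_append, List.foldl_cons,
        List.foldl_nil, tblStep_get s _ k hk']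
    by_cases he : s[k] = x
    · have ⟨h1, h2⟩ := (cnt_eq_char x s hp k hk').mp he
      rw [he, PySem.Dict.get?_insert_self]
      rw [if_neg (by omega)]
      congr 1
      have : min (k+1) (s.length - cntGT s x) = k + 1 := by omega
      rw [this]
      push_cast; ring
    · rw [PySem.Dict.get?_insert_of_ne _ _ (fun hc => he hc.symm), ih (by omega) d]
      have hne := (cnt_eq_char x s hp k hk').not.mp he
      by_cases hc : k < cntLT s x
      · rw [if_pos (by omega), if_pos (by omega)]
      · have hge : s.length - cntGT s x ≤ k := by omega
        rw [if_neg (by omega), if_neg (by omega)]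
        congr 2
        omega

theorem smallest_get? (x : Int) (s : List Int) (hp : s.Pairwise (· ≤ ·)) (hx : x ∈ s) :
    ∀ (j : Nat) (t : Int), t + 1 = (j : Int) → -1 ≤ t → t < (s.length : Int) →
      ∀ (d : PySem.Dict Int Int),
      ((PySem.List.pyRange t (-1) (-1)).foldl (tblStep s) d).get? x =
        if t < (cntLT s x : Int) then d.get? x else some ((cntLT s x : Int)) := by
  have hmem := mem_cnt_lt x s hp hx
  intro j
  induction j with
  | zero =>
    intro t ht _ _ d
    have : t = -1 := by omega
    subst this
    rw [PySem.List.pyRange_neg_one_eq_nil (le_refl _)]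
    rw [if_pos (by omega)]
    simp
  | succ j ih =>
    intro t ht h1 h2 d
    have ht0 : 0 ≤ t := by omega
    rw [PySem.List.pyRange_neg_one_cons (by omega), List.foldl_cons]
    have htk : t = ((t.toNat : Nat) : Int) := by omega
    have hklen : t.toNat < s.length := by omega
    have hget : PySem.List.pyGet? s t = some s[t.toNat] := by
      conv_lhs => rw [htk]
      rw [PySem.List.pyGet?_natCast]
      exact List.getElem?_eq_getElem hklen
    have hstep : tblStep s d t = d.insert s[t.toNat] t := by
      simp [tblStep, hget]
    rw [ih (t - 1) (by omega) (by omega) (by omega), hstep]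
    by_cases he : s[t.toNat] = x
    · have ⟨hA, hB⟩ := (cnt_eq_char x s hp t.toNat hklen).mp he
      rw [he, PySem.Dict.get?_insert_self]
      split_ifs with hc1 hc2 hc2
      · exfalso; omega
      · have : t = ((cntLT s x : Nat) : Int) := by omega
        rw [this]
      · exfalso; omega
      · rfl
    · have hne := (cnt_eq_char x s hp t.toNat hklen).not.mp he
      have hor : t.toNat < cntLT s x ∨ s.length - cntGT s x ≤ t.toNat := by
        by_contra hcon
        push_neg at hcon
        exact hne ⟨by omega, by omega⟩
      rw [PySem.Dict.get?_insert_of_ne _ _ (fun hc => he hc.symm)]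
      rcases hor with hor | hor
      · split_ifs with hc1 hc2 hc2
        · rfl
        · exfalso; omega
        · exfalso; omega
        · rfl
      · split_ifs with hc1 hc2 hc2
        · rfl
        · exfalso; omega
        · exfalso; omega
        · rfl

theorem pyGet_some (s : List Int) (t : Int) (h0 : 0 ≤ t) (h1 : t < (s.length : Int)) :
    PySem.List.pyGet? s t = some (s[t.toNat]'(by omega)) := by
  have htk : t = ((t.toNat : Nat) : Int) := by omega
  conv_lhs => rw [htk]
  rw [PySem.List.pyGet?_natCast]
  exact List.getElem?_eq_getElem (by omega)

theorem loopL_eq (x : Int) (s : List Int) (hp : s.Pairwise (· ≤ ·)) (hn : 0 < s.length)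
    (largest : PySem.Dict Int Int)
    (hL : x ∈ s → largest.get? x = some ((s.length : Int) - (cntGT s x : Int) - 1)) :
    ∀ (fuel : Nat) (left right : Int), -1 ≤ left → right ≤ (s.length : Int) →
      left < right → left < (cntLT s x : Int) →
      (s.length : Int) - (cntGT s x : Int) ≤ right →
      (right - left).toNat ≤ fuel →
      solveLoopL s (s.length : Int) largest x left right fuel =
        PySem.Int.toStr (cntGT s x : Int) ++ "\n" := by
  have hsum := cnt_sum_le x s
  have hlt_le : cntLT s x ≤ s.length := List.countP_le_length
  have hgt_le : cntGT s x ≤ s.length := List.countP_le_length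
  intro fuel
  induction fuel with
  | zero => intro left right _ _ hlr _ _ hfuel; exfalso; omega
  | succ fuel ih =>
    intro left right hl hr hlr hcl hcr hfuel
    rw [solveLoopL]
    by_cases hw : left + 1 < right
    · rw [if_pos hw]
      have hmid1 : left + 1 ≤ PySem.Int.floordiv (left + right) 2 := by
        rw [PySem.Int.le_floordiv_iff_mul_le (by norm_num)]; omega
      have hmid2 : PySem.Int.floordiv (left + right) 2 < right := by
        rw [PySem.Int.floordiv_lt_iff_lt_mul (by norm_num)]; omega
      generalize hmid : PySem.Int.floordiv (left + right) 2 = mid at *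
      have hget := pyGet_some s mid (by omega) (by omega)
      simp only [hget]
      have hmlen : mid.toNat < s.length := by omega
      by_cases c1 : s[mid.toNat] < x
      · rw [if_pos c1]
        have := (cnt_lt_char x s hp mid.toNat hmlen).mp c1
        exact ih mid right (by omega) hr hmid2 (by omega) hcr (by omega)
      · rw [if_neg c1]
        by_cases c2 : x < s[mid.toNat]
        · rw [if_pos c2]
          have := (cnt_gt_char x s hp mid.toNat hmlen).mp c2
          exact ih left mid hl (by omega) (by omega) hcl (by omega) (by omega)
        · rw [if_neg c2]
          have heq : s[mid.toNat] = x := by omega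
          have hmem : x ∈ s := heq ▸ List.getElem_mem hmlen
          rw [heq, hL hmem]
          have harith : (s.length : Int) - 1 - ((s.length : Int) - (cntGT s x : Int) - 1 + 1) + 1
              = (cntGT s x : Int) := by ring
          simp only [harith]
    · rw [if_neg hw]
      have hrl : right = left + 1 := by omega
      -- the loop ended without finding x
      have hget0 := pyGet_some s 0 (by omega) (by omega)
      have hgetl := pyGet_some s ((s.length : Int) - 1) (by omega) (by omega)
      simp only [hget0, hgetl]
      have hnx : ¬ x ∈ s := by
        intro hmem
        have := mem_cnt_lt x s hp hmem
        omega
      have hchain : (cntLT s x : Int) = (s.length : Int) - (cntGT s x : Int) := by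
        by_contra hne
        have hlt : (cntLT s x : Int) < (s.length : Int) - (cntGT s x : Int) := by omega
        have : x ∈ s := by
          have hilen : cntLT s x < s.length := by omega
          have := (cnt_eq_char x s hp (cntLT s x) hilen).mpr ⟨le_refl _, by omega⟩
          exact this ▸ List.getElem_mem hilen
        exact hnx this
      split_ifs with b1 b2
      · have b1' : x < s[(0 : Nat)]'hn := by simpa using b1
        have := (cnt_gt_char x s hp 0 hn).mp b1'
        have hc : (s.length : Int) = ((cntGT s x : Nat) : Int) := by omega
        rw [hc]
      · have hll : (((s.length : Int) - 1).toNat) < s.length := by omega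
        have hne2 : s[(((s.length : Int) - 1).toNat)]'hll ≠ x :=
          fun he => hnx (he ▸ List.getElem_mem hll)
        have hlast : s[(((s.length : Int) - 1).toNat)]'hll < x := by
          rcases lt_or_eq_of_le b2 with h | h
          · exact h
          · exact absurd h hne2
        have := (cnt_lt_char x s hp (((s.length : Int) - 1).toNat) hll).mp hlast
        have htn : (((s.length : Int) - 1).toNat) = s.length - 1 := by omega
        rw [htn] at this
        have hc : (0 : Int) = ((cntGT s x : Nat) : Int) := by omega
        rw [hc]
      · have hc : (s.length : Int) - right = ((cntGT s x : Nat) : Int) := by omega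
        rw [hc]

theorem loopS_eq (x : Int) (s : List Int) (hp : s.Pairwise (· ≤ ·)) (hn : 0 < s.length)
    (smallest : PySem.Dict Int Int)
    (hS : x ∈ s → smallest.get? x = some ((cntLT s x : Int))) :
    ∀ (fuel : Nat) (left right : Int), -1 ≤ left → right ≤ (s.length : Int) →
      left < right → left < (cntLT s x : Int) →
      (s.length : Int) - (cntGT s x : Int) ≤ right →
      (right - left).toNat ≤ fuel →
      solveLoopS s (s.length : Int) smallest x left right fuel =
        PySem.Int.toStr (cntLT s x : Int) ++ "\n" := by
  have hsum := cnt_sum_le x s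
  have hlt_le : cntLT s x ≤ s.length := List.countP_le_length
  have hgt_le : cntGT s x ≤ s.length := List.countP_le_length
  intro fuel
  induction fuel with
  | zero => intro left right _ _ hlr _ _ hfuel; exfalso; omega
  | succ fuel ih =>
    intro left right hl hr hlr hcl hcr hfuel
    rw [solveLoopS]
    by_cases hw : left + 1 < right
    · rw [if_pos hw]
      have hmid1 : left + 1 ≤ PySem.Int.floordiv (left + right) 2 := by
        rw [PySem.Int.le_floordiv_iff_mul_le (by norm_num)]; omega
      have hmid2 : PySem.Int.floordiv (left + right) 2 < right := by
        rw [PySem.Int.floordiv_lt_iff_lt_mul (by norm_num)]; omega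
      generalize hmid : PySem.Int.floordiv (left + right) 2 = mid at *
      have hget := pyGet_some s mid (by omega) (by omega)
      simp only [hget]
      have hmlen : mid.toNat < s.length := by omega
      by_cases c1 : s[mid.toNat] < x
      · rw [if_pos c1]
        have := (cnt_lt_char x s hp mid.toNat hmlen).mp c1
        exact ih mid right (by omega) hr hmid2 (by omega) hcr (by omega)
      · rw [if_neg c1]
        by_cases c2 : x < s[mid.toNat]
        · rw [if_pos c2]
          have := (cnt_gt_char x s hp mid.toNat hmlen).mp c2
          exact ih left mid hl (by omega) (by omega) hcl (by omega) (by omega)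
        · rw [if_neg c2]
          have heq : s[mid.toNat] = x := by omega
          have hmem : x ∈ s := heq ▸ List.getElem_mem hmlen
          rw [heq, hS hmem]
    · rw [if_neg hw]
      have hrl : right = left + 1 := by omega
      have hget0 := pyGet_some s 0 (by omega) (by omega)
      have hgetl := pyGet_some s ((s.length : Int) - 1) (by omega) (by omega)
      simp only [hget0, hgetl]
      have hnx : ¬ x ∈ s := by
        intro hmem
        have := mem_cnt_lt x s hp hmem
        omega
      have hchain : (cntLT s x : Int) = (s.length : Int) - (cntGT s x : Int) := by
        by_contra hne
        have hlt : (cntLT s x : Int) < (s.length : Int) - (cntGT s x : Int) := by omega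
        have : x ∈ s := by
          have hilen : cntLT s x < s.length := by omega
          have := (cnt_eq_char x s hp (cntLT s x) hilen).mpr ⟨le_refl _, by omega⟩
          exact this ▸ List.getElem_mem hilen
        exact hnx this
      split_ifs with b1 b2
      · have hll : (((s.length : Int) - 1).toNat) < s.length := by omega
        have := (cnt_lt_char x s hp (((s.length : Int) - 1).toNat) hll).mp b1
        have htn : (((s.length : Int) - 1).toNat) = s.length - 1 := by omega
        rw [htn] at this
        have hc : (s.length : Int) = ((cntLT s x : Nat) : Int) := by omega
        rw [hc]
      · have hne0 : x ≠ s[(0 : Nat)]'hn :=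
          fun he => hnx (he ▸ List.getElem_mem hn)
        have hx0 : x < s[(0 : Nat)]'hn := by
          have b2' : x ≤ s[(0 : Nat)]'hn := by simpa using b2
          rcases lt_or_eq_of_le b2' with h | h
          · exact h
          · exact absurd h hne0
        have := (cnt_gt_char x s hp 0 hn).mp hx0
        have hc : (0 : Int) = ((cntLT s x : Nat) : Int) := by omega
        rw [hc]
      · have hc : right = ((cntLT s x : Nat) : Int) := by omega
        rw [hc]

theorem fold_append_eq_join {α : Type} (f g : α → String) (h : ∀ el, f el = g el) :
    ∀ (L : List α) (acc : String),
      L.foldl (fun acc el => acc ++ f el) acc = acc ++ PySem.Str.join "" (L.map g) := by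
  intro L
  induction L with
  | nil => intro acc; simp [PySem.Str.join, PySem.Chars.join_nil]
  | cons e t ih =>
    intro acc
    simp only [List.foldl_cons, List.map_cons, join_empty_cons]
    rw [ih, h e, String.append_assoc]


theorem loopL_prefix (s t : List Int) (n : Int) (dct : PySem.Dict Int Int) (x : Int)
    (h : ∀ i : Int, 0 ≤ i → i < n → PySem.List.pyGet? s i = PySem.List.pyGet? t i)
    (hn : 0 < n) :
    ∀ (fuel : Nat) (left right : Int), -1 ≤ left → right ≤ n →
      solveLoopL s n dct x left right fuel = solveLoopL t n dct x left right fuel := by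
  intro fuel
  induction fuel with
  | zero => intro left right _ _; rfl
  | succ fuel ih =>
    intro left right hl hr
    rw [solveLoopL, solveLoopL]
    by_cases hw : left + 1 < right
    · rw [if_pos hw, if_pos hw]
      have hmid1 : left + 1 ≤ PySem.Int.floordiv (left + right) 2 := by
        rw [PySem.Int.le_floordiv_iff_mul_le (by norm_num)]; omega
      have hmid2 : PySem.Int.floordiv (left + right) 2 < right := by
        rw [PySem.Int.floordiv_lt_iff_lt_mul (by norm_num)]; omega
      generalize hmid : PySem.Int.floordiv (left + right) 2 = mid at *
      simp only [h mid (by omega) (by omega)]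
      cases hg : PySem.List.pyGet? t mid with
      | none => simp only [hg]
      | some am =>
        simp only [hg]
        split_ifs with c1 c2
        · exact ih mid right (by omega) hr
        · exact ih left mid hl (by omega)
        · rfl
    · rw [if_neg hw, if_neg hw]
      simp only [h 0 (by omega) hn, h (n - 1) (by omega) (by omega)]

theorem loopS_prefix (s t : List Int) (n : Int) (dct : PySem.Dict Int Int) (x : Int)
    (h : ∀ i : Int, 0 ≤ i → i < n → PySem.List.pyGet? s i = PySem.List.pyGet? t i)
    (hn : 0 < n) :
    ∀ (fuel : Nat) (left right : Int), -1 ≤ left → right ≤ n →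
      solveLoopS s n dct x left right fuel = solveLoopS t n dct x left right fuel := by
  intro fuel
  induction fuel with
  | zero => intro left right _ _; rfl
  | succ fuel ih =>
    intro left right hl hr
    rw [solveLoopS, solveLoopS]
    by_cases hw : left + 1 < right
    · rw [if_pos hw, if_pos hw]
      have hmid1 : left + 1 ≤ PySem.Int.floordiv (left + right) 2 := by
        rw [PySem.Int.le_floordiv_iff_mul_le (by norm_num)]; omega
      have hmid2 : PySem.Int.floordiv (left + right) 2 < right := by
        rw [PySem.Int.floordiv_lt_iff_lt_mul (by norm_num)]; omega
      generalize hmid : PySem.Int.floordiv (left + right) 2 = mid at *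
      simp only [h mid (by omega) (by omega)]
      cases hg : PySem.List.pyGet? t mid with
      | none => simp only [hg]
      | some am =>
        simp only [hg]
        split_ifs with c1 c2
        · exact ih mid right (by omega) hr
        · exact ih left mid hl (by omega)
        · rfl
    · rw [if_neg hw, if_neg hw]
      simp only [h 0 (by omega) hn, h (n - 1) (by omega) (by omega)]

theorem tbl_prefix (s t : List Int) (n : Int)
    (h : ∀ i : Int, 0 ≤ i → i < n → PySem.List.pyGet? s i = PySem.List.pyGet? t i) :
    ∀ (l : List Int), (∀ i ∈ l, 0 ≤ i ∧ i < n) → ∀ (d : PySem.Dict Int Int),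
      l.foldl (tblStep s) d = l.foldl (tblStep t) d := by
  intro l hl d
  apply PySem.List.foldl_congr_mem
  intro acc i hi
  simp only [tblStep, h i (hl i hi).1 (hl i hi).2]

theorem pyGet_neg_one (s : List Int) (h : s ≠ []) :
    ∃ v, PySem.List.pyGet? s (-1) = some v := by
  have hl : 0 < s.length := List.length_pos_iff.mpr h
  refine ⟨s[s.length - 1]'(by omega), ?_⟩
  simp [PySem.List.pyGet?, PySem.List.pyIdx?]
  rw [if_pos (by omega)]
  simp [List.getElem?_eq_getElem (show s.length - 1 < s.length by omega)]

theorem loopL_zero (s : List Int) (d : PySem.Dict Int Int) (x : Int) (hs : s ≠ [])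
    {n : Int} (hn0 : n = 0) :
    solveLoopL s n d x (-1) n ((n + 1).toNat + 1) = PySem.Int.toStr n ++ "\n" := by
  subst hn0
  have hl : 0 < s.length := List.length_pos_iff.mpr hs
  obtain ⟨w, hw⟩ := pyGet_neg_one s hs
  rw [show ((0 : Int) + 1).toNat + 1 = 1 + 1 from rfl, solveLoopL]
  rw [if_neg (by omega)]
  have hget0 := pyGet_some s 0 (by omega) (by omega)
  simp only [hget0, show (0 : Int) - 1 = -1 from rfl, hw]
  split_ifs
  · rfl
  · rfl
  · norm_num

theorem loopS_zero (s : List Int) (d : PySem.Dict Int Int) (x : Int) (hs : s ≠ [])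
    {n : Int} (hn0 : n = 0) :
    solveLoopS s n d x (-1) n ((n + 1).toNat + 1) = PySem.Int.toStr n ++ "\n" := by
  subst hn0
  have hl : 0 < s.length := List.length_pos_iff.mpr hs
  obtain ⟨w, hw⟩ := pyGet_neg_one s hs
  rw [show ((0 : Int) + 1).toNat + 1 = 1 + 1 from rfl, solveLoopS]
  rw [if_neg (by omega)]
  have hget0 := pyGet_some s 0 (by omega) (by omega)
  simp only [hget0, show (0 : Int) - 1 = -1 from rfl, hw]
  split_ifs
  · rfl
  · rfl
  · rfl

theorem solve_eq_alt (n : Int) (a : List Int) (m : Int) (li : List (Int × String))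
    (hn : n ≤ (a.length : Int)) (hq : li ≠ [] → 1 ≤ n ∨ (n = 0 ∧ a ≠ [])) :
    solve n a m li = solve_alt n a m li := by
  rcases li with _ | ⟨e0, rest⟩
  · simp [solve, solve_alt, PySem.Str.join, PySem.Chars.join_nil]
  · have hor : 1 ≤ n ∨ (n = 0 ∧ a ≠ []) := hq (by simp)
    have h0n : 0 ≤ n := by rcases hor with h | ⟨h, _⟩ <;> omega
    have hlen : (PySem.List.sorted a (fun v => v)).length = a.length :=
      PySem.List.length_sorted a _ _
    have hp : (PySem.List.sorted a (fun v => v)).Pairwise (· ≤ ·) :=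
      PySem.List.sorted_pairwise a _
    set s := PySem.List.sorted a (fun v => v) with hs
    have hns : n ≤ (s.length : Int) := by omega
    have hNl : n.toNat ≤ s.length := by omega
    set t := s.take n.toNat with htdef
    have htl : t.length = n.toNat := by
      rw [htdef, List.length_take]; omega
    have hnt : n = (t.length : Int) := by omega
    have hpt : t.Pairwise (· ≤ ·) := hp.sublist (List.take_sublist n.toNat s)
    have hpre : ∀ i : Int, 0 ≤ i → i < n → PySem.List.pyGet? s i = PySem.List.pyGet? t i := by
      intro i h0 hi
      have hiN : i.toNat < t.length := by omega
      rw [pyGet_some s i h0 (by omega), pyGet_some t i h0 (by omega)]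
      congr 1
      exact (List.getElem_take).symm
    have hslice : PySem.List.slice s none (some n) = t := by
      rw [PySem.List.slice_to s (by omega)]
    unfold solve solve_alt
    rw [← hs]
    dsimp only []
    rw [hslice]
    rcases hor with h1n | ⟨hn0, hane⟩
    case inr =>  -- n = 0 (and a nonempty): every query answers 0
      have hsne : s ≠ [] := by
        intro h'
        exact hane (by rwa [PySem.List.sorted_eq_nil_iff] at h')
      have ht0 : t = [] := by rw [htdef, hn0]; rfl
      rw [fold_append_eq_join _ _ ?_ (e0 :: rest) ""]
      · rw [String.empty_append]
      intro el
      by_cases hop : (el.2 == "LARGER") = true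
      · simp only [hop, if_true]
        rw [loopL_zero s _ el.1 hsne hn0]
        rw [PySem.List.foldl_ite_add_one, zero_add, ht0]
        rw [hn0]
        norm_num
      · simp only [hop, Bool.false_eq_true, if_false]
        rw [loopS_zero s _ el.1 hsne hn0]
        rw [PySem.List.foldl_ite_add_one, zero_add, ht0]
        rw [hn0]
        norm_num
    case inl =>
    have hpos : 0 < t.length := by omega
    rw [fold_append_eq_join _ _ ?_ (e0 :: rest) ""]
    · rw [String.empty_append]
    intro el
    have hsum := cnt_sum_le el.1 t
    have hlt_le : cntLT t el.1 ≤ t.length := List.countP_le_length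
    have hgt_le : cntGT t el.1 ≤ t.length := List.countP_le_length
    by_cases hop : (el.2 == "LARGER") = true
    · simp only [hop, if_true]
      rw [tbl_prefix s t n hpre (PySem.List.pyRange 0 n 1)
            (fun i hi => by
              have := PySem.List.mem_pyRange_one.mp hi
              exact ⟨this.1, this.2⟩) _]
      rw [loopL_prefix s t n _ el.1 hpre (by omega) _ (-1) n (by omega) (le_refl n)]
      rw [hnt]
      rw [loopL_eq el.1 t hpt hpos _ ?_ ((((t.length : Int)) + 1).toNat + 1) (-1) (t.length : Int)
            (by omega) (by omega) (by omega) (by omega) (by omega) (by omega)]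
      · rw [PySem.List.foldl_ite_add_one, zero_add]
        rfl
      · intro hx
        have hmem := mem_cnt_lt el.1 t hpt hx
        rw [largest_get? el.1 t hpt hx t.length (le_refl _) _]
        rw [if_neg (by omega)]
        congr 1
        omega
    · simp only [hop, Bool.false_eq_true, if_false]
      rw [tbl_prefix s t n hpre (PySem.List.pyRange (n - 1) (-1) (-1))
            (fun i hi => by
              have := PySem.List.mem_pyRange_neg_one.mp hi
              exact ⟨by omega, by omega⟩) _]
      rw [loopS_prefix s t n _ el.1 hpre (by omega) _ (-1) n (by omega) (le_refl n)]
      rw [hnt]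
      rw [loopS_eq el.1 t hpt hpos _ ?_ ((((t.length : Int)) + 1).toNat + 1) (-1) (t.length : Int)
            (by omega) (by omega) (by omega) (by omega) (by omega) (by omega)]
      · rw [PySem.List.foldl_ite_add_one, zero_add]
        rfl
      · intro hx
        have hmem := mem_cnt_lt el.1 t hpt hx
        rw [smallest_get? el.1 t hpt hx t.length ((t.length : Int) - 1) (by omega) (by omega)
              (by omega) _]
        rw [if_neg (by omega)]

-- ===== VERDICT (by name: the statement is the Claim_ definition above) =====
theorem solve_spec : Claim_equal_solve := by
  unfold Claim_equal_solve
  intro n a m li _ hpre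
  exact solve_eq_alt n a m li hpre.1 hpre.2
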